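-- pv_equiv track=rewrite | github.com/datawhalechina/huawei-od-python | codes/choice100/272_decrypt-string.py | get_available_strings
-- ===== SOURCE A (Python) =====
-- def get_available_strings(string1):
--     scrambled_sub = "1234567890abcdef"
--
--     avail_strings = []
--     tmp_string = ""
--     for c in string1:
--         if c not in scrambled_sub:
--             tmp_string += c
--         else:
--             if tmp_string != "":
--                 avail_strings.append(tmp_string)
--                 tmp_string = ""
--
--     if tmp_string != "":
--         avail_strings.append(tmp_string)
--
--     return avail_strings
-- ===== SOURCE B (Python) =====
-- def get_available_strings(string1):
--     scrambled_sub = "1234567890abcdef"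
--     res = []
--     i, n = 0, len(string1)
--     while i < n:
--         if string1[i] in scrambled_sub:
--             i += 1
--         else:
--             j = i
--             while j < n and string1[j] not in scrambled_sub:
--                 j += 1
--             res.append(string1[i:j])
--             i = j
--     return res
-- ===== Notes on version B (the rewrite author's own statement) =====
-- stated objective: alternative
-- what changed: Replaces A's character-by-character state machine (growing tmp_string with flush branches) by an index scan that skips hex characters and extracts each maximal non-hex run directly with an inner scan plus a slice.
import Mathlib
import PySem

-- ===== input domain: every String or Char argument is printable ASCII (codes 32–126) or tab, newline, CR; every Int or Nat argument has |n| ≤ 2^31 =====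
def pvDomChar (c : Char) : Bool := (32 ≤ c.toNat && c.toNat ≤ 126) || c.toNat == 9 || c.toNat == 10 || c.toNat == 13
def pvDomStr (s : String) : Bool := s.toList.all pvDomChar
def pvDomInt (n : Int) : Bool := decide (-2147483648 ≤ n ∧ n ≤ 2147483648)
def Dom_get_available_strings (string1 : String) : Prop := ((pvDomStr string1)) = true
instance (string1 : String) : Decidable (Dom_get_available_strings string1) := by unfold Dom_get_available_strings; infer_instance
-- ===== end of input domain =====

-- B replaces A's tmp_string state machine by an index scan extracting each maximal
-- non-hex run as a slice (alternative decomposition; same cost, return value identical).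

-- ===== PORT A =====
-- 'c in scrambled_sub' for scrambled_sub = "1234567890abcdef"
def pvIsHex (c : Char) : Bool := ("1234567890abcdef".toList).contains c

-- one iteration of A's for-loop; state = (avail_strings, tmp_string as chars)
def pvStepA (st : List String × List Char) (c : Char) : List String × List Char :=
  if ¬ pvIsHex c then (st.1, st.2 ++ [c])
  else if st.2 ≠ [] then (st.1 ++ [String.mk st.2], []) else st

def get_available_strings (string1 : String) : List String :=
  let st := string1.toList.foldl pvStepA ([], [])
  if st.2 ≠ [] then st.1 ++ [String.mk st.2] else st.1

-- ===== PORT B =====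
def pvNonHex (c : Char) : Bool := !pvIsHex c

-- Source B's outer while loop: skip a hex char, or slice out the maximal non-hex run
def pvRuns : List Char → List String
  | [] => []
  | c :: rest =>
    if pvIsHex c then pvRuns rest
    else String.mk (c :: rest.takeWhile pvNonHex) :: pvRuns (rest.dropWhile pvNonHex)
termination_by l => l.length
decreasing_by
  · simp
  · exact Nat.lt_succ_of_le (List.length_dropWhile_le _ _)

def get_available_strings_alt (string1 : String) : List String :=
  pvRuns string1.toList

-- ===== PRECONDITION & SPEC =====
def Spec_get_available_strings (string1 : String) (out : List String) : Prop := out = get_available_strings_alt string1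
instance (string1 : String) (out : List String) : Decidable (Spec_get_available_strings string1 out) := by unfold Spec_get_available_strings; infer_instance

-- ===== CLAIM (what is proved, stated in full; the proofs are below) =====
def Claim_equal_get_available_strings : Prop := ∀ (string1 : String), Dom_get_available_strings string1 → Spec_get_available_strings string1 (get_available_strings string1)

-- ===== LEMMAS AND PROOFS =====

-- proof-side characterisation of A's remaining output given pending tmp
def pvTokens (tmp : List Char) : List Char → List String
  | [] => if tmp ≠ [] then [String.mk tmp] else []
  | c :: rest =>
    if ¬ pvIsHex c then pvTokens (tmp ++ [c]) rest
    else (if tmp ≠ [] then [String.mk tmp] else []) ++ pvTokens [] rest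

theorem pvFoldA_eq (l : List Char) : ∀ (acc : List String) (tmp : List Char),
    (let st := l.foldl pvStepA (acc, tmp);
     if st.2 ≠ [] then st.1 ++ [String.mk st.2] else st.1) = acc ++ pvTokens tmp l := by
  induction l with
  | nil =>
    intro acc tmp
    by_cases h : tmp = [] <;> simp [pvTokens, h]
  | cons c rest ih =>
    intro acc tmp
    by_cases hc : pvIsHex c
    · by_cases ht : tmp = []
      · simp [pvTokens, pvStepA, hc, ht, ih]
      · simp [pvTokens, pvStepA, hc, ht, ih]
    · simp [pvTokens, pvStepA, hc, ih]

theorem pvTokens_pending (l : List Char) : ∀ (tmp : List Char), tmp ≠ [] →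
    pvTokens tmp l =
      String.mk (tmp ++ l.takeWhile pvNonHex) :: pvTokens [] (l.dropWhile pvNonHex) := by
  induction l with
  | nil => intro tmp h; simp [pvTokens, h]
  | cons c rest ih =>
    intro tmp h
    by_cases hc : pvIsHex c
    · simp [pvTokens, hc, h, pvNonHex, List.takeWhile, List.dropWhile]
    · have := ih (tmp ++ [c]) (by simp)
      simp [pvTokens, hc, pvNonHex, List.takeWhile, List.dropWhile, this]

theorem pvTokens_nil_eq_runs (n : Nat) : ∀ (l : List Char), l.length ≤ n →
    pvTokens [] l = pvRuns l := by
  induction n with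
  | zero =>
    intro l hl
    have : l = [] := List.eq_nil_of_length_eq_zero (Nat.le_zero.mp hl)
    simp [this, pvTokens, pvRuns]
  | succ n ih =>
    intro l hl
    match l with
    | [] => simp [pvTokens, pvRuns]
    | c :: rest =>
      simp only [List.length_cons, Nat.succ_le_succ_iff] at hl
      by_cases hc : pvIsHex c
      · have := ih rest hl
        simp [pvTokens, pvRuns, hc, this]
      · have hpend := pvTokens_pending rest [c] (by simp)
        have hdrop : (rest.dropWhile pvNonHex).length ≤ n :=
          le_trans (List.length_dropWhile_le _ _) hl
        have := ih _ hdrop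
        simp [pvTokens, pvRuns, hc, hpend, this]

-- ===== VERDICT (by name: the statement is the Claim_ definition above) =====
theorem get_available_strings_spec : Claim_equal_get_available_strings := by
  intro s _
  unfold Spec_get_available_strings get_available_strings get_available_strings_alt
  rw [pvFoldA_eq]
  simp [pvTokens_nil_eq_runs s.toList.length s.toList le_rfl]
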